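-- pv_equiv track=rewrite | github.com/United-DigiArt-Vision/jonny-lab | tools/tiered-research/research.py | _extract_tweet_info
-- ===== SOURCE A (Python) =====
-- def _extract_tweet_info(query: str):
--     """Extract (screen_name, tweet_id) from URL or raw ID. screen_name may be None."""
--     query = query.strip()
--     # Direct ID
--     if query.isdigit():
--         return None, query
--     # URL patterns: twitter.com/USER/status/ID or x.com/USER/status/ID
--     parts = query.rstrip("/").split("/")
--     for i, p in enumerate(parts):
--         if p == "status" and i + 1 < len(parts):
--             tid = parts[i + 1].split("?")[0]
--             screen_name = parts[i - 1] if i > 0 else None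
--             if tid.isdigit():
--                 return screen_name, tid
--     return None, None
-- ===== SOURCE B (Python) =====
-- import re
--
-- # One precompiled pattern instead of rstrip/split/index-loop: an optional screen-name
-- # segment, a 'status' segment, then an all-digit id segment (optionally followed by a
-- # '?query' suffix) ending at a '/' or at the end of the string.
-- _STATUS_RE = re.compile(r'(?:^|/)(?:([^/]*)/)?status/(\d+)(?:\?[^/]*)?(?:/|$)')
--
--
-- def _extract_tweet_info(query: str):
--     """Extract (screen_name, tweet_id) from URL or raw ID. screen_name may be None."""
--     query = query.strip()
--     if query.isdigit():
--         return None, query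
--     m = _STATUS_RE.search(query)
--     if m:
--         return m.group(1), m.group(2)
--     return None, None
-- ===== Notes on version B (the rewrite author's own statement) =====
-- stated objective: idiomatic
-- what changed: A rstrip-slashes the query, splits it into path segments and scans the segment list with an index loop (peeking at the previous and next segment); B instead does a single re.search over the stripped string with one precompiled pattern whose two groups deliver screen_name and the all-digit tweet id directly.
import Mathlib
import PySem

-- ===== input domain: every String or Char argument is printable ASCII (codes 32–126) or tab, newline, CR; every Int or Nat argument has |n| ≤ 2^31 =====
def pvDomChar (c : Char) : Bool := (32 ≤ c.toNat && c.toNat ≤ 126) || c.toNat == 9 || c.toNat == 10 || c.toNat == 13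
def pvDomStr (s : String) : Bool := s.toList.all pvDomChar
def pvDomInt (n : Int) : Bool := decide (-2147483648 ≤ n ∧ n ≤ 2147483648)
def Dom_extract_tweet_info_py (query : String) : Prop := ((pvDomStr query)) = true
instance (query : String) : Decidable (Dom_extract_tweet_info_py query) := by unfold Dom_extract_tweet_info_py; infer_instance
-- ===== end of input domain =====

-- B replaces A's rstrip/split/index-loop by a single left-to-right regex-style search
-- (one precompiled pattern in Source B); objective: idiomatic. Both proved to return the same pair.

-- ===== PORT A =====

def pvRstripSlash (s : List Char) : List Char :=
  (s.reverse.dropWhile (fun c => c == '/')).reverse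

def pvAGo (parts : List (List Char)) (i : Nat) : Option String × Option String :=
  if _h : i < parts.length then
    if parts.getD i [] = "status".toList ∧ i + 1 < parts.length then
      let tid := (PySem.Chars.splitOn (parts.getD (i+1) []) ['?']).headD []
      let screen_name := if 0 < i then some (String.ofList (parts.getD (i-1) [])) else none
      if PySem.Chars.strIsdigit tid then (screen_name, some (String.ofList tid))
      else pvAGo parts (i+1)
    else pvAGo parts (i+1)
  else (none, none)
termination_by parts.length - i

def extract_tweet_info_py (query : String) : Option String × Option String :=
  let q := PySem.Str.strip query
  if PySem.Str.strIsdigit q then (none, some q)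
  else
    let parts := PySem.Chars.splitOn (pvRstripSlash q.toList) ['/']
    pvAGo parts 0

-- ===== PORT B =====

-- Source B does re.search with the fixed precompiled pattern
-- r'(?:^|/)(?:([^/]*)/)?status/(\d+)(?:\?[^/]*)?(?:/|$)'.
-- PySem has no regex engine, so the search is hand-ported step for step; for THIS pattern
-- every quantifier is deterministic ([^/]* and \d+ can only match their maximal run, because
-- any shorter match leaves a next character that cannot start the rest of the pattern), so
-- backtracking reduces to the branch order written out below. Exact for this pattern.

def pvMatchStatus (l : List Char) : Option (List Char) :=
  if PySem.Chars.startswith l ("status/".toList) then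
    let r := l.drop 7
    let ds := r.takeWhile PySem.Chars.isdigit
    if ds = [] then none
    else
      match r.dropWhile PySem.Chars.isdigit with
      | [] => some ds
      | c :: _ => if c == '?' || c == '/' then some ds else none
  else none

def pvMatchCore (l : List Char) : Option (Option (List Char) × List Char) :=
  match l.dropWhile (fun c => c != '/') with
  | _ :: r' =>
    match pvMatchStatus r' with
    | some tid => some (some (l.takeWhile (fun c => c != '/')), tid)
    | none => (pvMatchStatus l).map (fun tid => (none, tid))
  | [] => (pvMatchStatus l).map (fun tid => (none, tid))

def pvGo : List Char → Option (Option (List Char) × List Char)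
  | [] => none
  | c :: tl => if c == '/' then (pvMatchCore tl).or (pvGo tl) else pvGo tl

def pvSearch (l : List Char) : Option (Option (List Char) × List Char) :=
  (pvMatchCore l).or (pvGo l)

def extract_tweet_info_py_alt (query : String) : Option String × Option String :=
  let q := PySem.Str.strip query
  if PySem.Str.strIsdigit q then (none, some q)
  else
    match pvSearch q.toList with
    | some (sn, tid) => (sn.map String.ofList, some (String.ofList tid))
    | none => (none, none)

-- ===== PRECONDITION & SPEC =====
def Spec_extract_tweet_info_py (query : String) (out : Option String × Option String) : Prop := out = extract_tweet_info_py_alt query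
instance (query : String) (out : Option String × Option String) : Decidable (Spec_extract_tweet_info_py query out) := by unfold Spec_extract_tweet_info_py; infer_instance

-- ===== CLAIM (what is proved, stated in full; the proofs are below) =====
def Claim_equal_extract_tweet_info_py : Prop := ∀ (query : String), Dom_extract_tweet_info_py query → Spec_extract_tweet_info_py query (extract_tweet_info_py query)

-- ===== LEMMAS AND PROOFS =====

-- tid of a segment: the part before the first '?' (what A's seg.split("?")[0] computes).
def pvTid (s : List Char) : List Char := s.takeWhile (fun c => c != '?')

def pvLoopA : Option (List Char) → List (List Char) → Option (Option (List Char) × List Char)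
  | _, [] => none
  | prev, p :: rest =>
    if p = "status".toList ∧ rest ≠ [] ∧ PySem.Chars.strIsdigit (pvTid (rest.headD [])) then
      some (prev, pvTid (rest.headD []))
    else pvLoopA (some p) rest

def pvRender : Option (Option (List Char) × List Char) → Option String × Option String
  | none => (none, none)
  | some (sn, tid) => (sn.map String.ofList, some (String.ofList tid))

theorem pvSplitOn_go_eq (c : Char) :
    ∀ (fuel : Nat) (l cur : List Char) (accl : List (List Char)), l.length ≤ fuel →
      PySem.Chars.splitOn.go [c] fuel l cur accl =
        accl.reverse ++ (l.splitOnP (· == c)).modifyHead (cur.reverse ++ ·) := by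
  intro fuel
  induction fuel with
  | zero =>
    intro l cur accl h
    have : l = [] := List.length_eq_zero_iff.mp (Nat.le_zero.mp h)
    subst this
    simp [PySem.Chars.splitOn.go, List.splitOnP_nil]
  | succ n ih =>
    intro l cur accl h
    cases l with
    | nil => simp [PySem.Chars.splitOn.go, List.splitOnP_nil]
    | cons x rest =>
      rw [PySem.Chars.splitOn.go]
      by_cases hx : x = c
      · subst hx
        have hpre : List.isPrefixOf [x] (x :: rest) = true := by
          simp [List.isPrefixOf]
        rw [if_pos hpre]
        rw [show List.drop (List.length [x]) (x :: rest) = rest from rfl]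
        rw [ih rest [] (cur.reverse :: accl) (by simpa using Nat.le_of_succ_le_succ h)]
        simp only [List.splitOnP_cons, beq_self_eq_true, if_true, List.modifyHead]
        simp only [List.reverse_cons, List.append_assoc, List.singleton_append]
        congr 1
        cases List.splitOnP (fun y => y == x) rest <;> simp
      · have hpre : List.isPrefixOf [c] (x :: rest) = false := by
          simp [List.isPrefixOf]; exact fun h => hx h.symm
        rw [if_neg (by simp [hpre])]
        rw [ih rest (x :: cur) accl (by simpa using Nat.le_of_succ_le_succ h)]
        have hne : rest.splitOnP (· == c) ≠ [] := List.splitOnP_ne_nil _ _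
        obtain ⟨hh, tt, hrest⟩ := List.exists_cons_of_ne_nil hne
        simp [List.splitOnP_cons, hx, hrest, List.modifyHead]

theorem pvSplitOn_eq (s : List Char) (c : Char) :
    PySem.Chars.splitOn s [c] = s.splitOnP (· == c) := by
  rw [PySem.Chars.splitOn, pvSplitOn_go_eq c (s.length + 1) s [] [] (by omega)]
  cases h : s.splitOnP (· == c) <;> simp [List.modifyHead]

theorem pvHeadD_splitOnP (s : List Char) :
    (s.splitOnP (· == '?')).headD [] = pvTid s := by
  induction s with
  | nil => simp [List.splitOnP_nil, pvTid]
  | cons x rest ih =>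
    by_cases hx : x = '?'
    · subst hx; simp [List.splitOnP_cons, pvTid]
    · have hne := List.splitOnP_ne_nil (· == '?') rest
      obtain ⟨hh, tt, hrest⟩ := List.exists_cons_of_ne_nil hne
      simp only [List.splitOnP_cons, beq_iff_eq, hx, if_false, hrest, List.modifyHead,
        List.headD_cons, pvTid, List.takeWhile_cons, bne_iff_ne, ne_eq, not_false_iff, if_pos]
      rw [← pvTid, ← ih, hrest]
      simp

theorem pvSplitOnP_slash_free (l : List Char) :
    ∀ s ∈ l.splitOnP (· == '/'), '/' ∉ s := by
  induction l with
  | nil => intro s hs; simp [List.splitOnP_nil] at hs; simp [hs]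
  | cons x rest ih =>
    intro s hs
    by_cases hx : x = '/'
    · subst hx
      simp only [List.splitOnP_cons, beq_self_eq_true, if_true, List.mem_cons] at hs
      rcases hs with h | h
      · simp [h]
      · exact ih s h
    · obtain ⟨hh, tt, hrest⟩ := List.exists_cons_of_ne_nil (List.splitOnP_ne_nil (· == '/') rest)
      simp only [List.splitOnP_cons, beq_iff_eq, hx, if_false, hrest, List.modifyHead,
        List.mem_cons] at hs
      rcases hs with h | h
      · subst h
        intro hmem
        rcases List.mem_cons.mp hmem with h | h
        · exact hx h.symm
        · exact ih hh (by rw [hrest]; exact List.mem_cons_self) h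
      · exact ih s (by rw [hrest]; exact List.mem_cons_of_mem _ h)

theorem pvSplitOnP_append_slash (l : List Char) :
    (l ++ ['/']).splitOnP (· == '/') = l.splitOnP (· == '/') ++ [[]] := by
  induction l with
  | nil => simp [List.splitOnP_cons, List.splitOnP_nil]
  | cons x rest ih =>
    by_cases hx : x = '/'
    · subst hx; simp [List.splitOnP_cons, ih]
    · obtain ⟨hh, tt, hrest⟩ := List.exists_cons_of_ne_nil (List.splitOnP_ne_nil (· == '/') rest)
      simp only [List.cons_append, List.splitOnP_cons, beq_iff_eq, hx, if_false, ih, hrest,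
        List.modifyHead, List.cons_append]

theorem pvLoopA_cons (prev : Option (List Char)) (p : List Char) (rest : List (List Char)) :
    pvLoopA prev (p :: rest) =
      if p = "status".toList ∧ rest ≠ [] ∧ PySem.Chars.strIsdigit (pvTid (rest.headD [])) then
        some (prev, pvTid (rest.headD []))
      else pvLoopA (some p) rest := rfl

theorem pvLoopA_append_nil (segs : List (List Char)) :
    ∀ prev, pvLoopA prev (segs ++ [[]]) = pvLoopA prev segs := by
  induction segs with
  | nil =>
    intro prev
    simp [pvLoopA, pvTid, PySem.Chars.strIsdigit]
  | cons s rest ih =>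
    intro prev
    cases rest with
    | nil =>
      simp [pvLoopA, pvTid, PySem.Chars.strIsdigit]
    | cons r2 rest' =>
      rw [List.cons_append, pvLoopA_cons, pvLoopA_cons]
      simp only [List.cons_append, List.headD_cons]
      by_cases hc : s = "status".toList ∧ PySem.Chars.strIsdigit (pvTid r2) = true
      · rw [if_pos ⟨hc.1, by simp, hc.2⟩, if_pos ⟨hc.1, by simp, hc.2⟩]
      · rw [if_neg (by rintro ⟨a, -, b⟩; exact hc ⟨a, b⟩),
            if_neg (by rintro ⟨a, -, b⟩; exact hc ⟨a, b⟩)]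
        exact ih (some s)

theorem pvLoopA_rstrip (v : List Char) :
    ∀ m, pvLoopA none ((v ++ List.replicate m '/').splitOnP (· == '/')) =
      pvLoopA none (v.splitOnP (· == '/')) := by
  intro m
  induction m with
  | zero => simp
  | succ n ih =>
    rw [List.replicate_succ']
    rw [← List.append_assoc, pvSplitOnP_append_slash, pvLoopA_append_nil, ih]

theorem pvRstrip_decomp (s : List Char) :
    ∃ m, s = pvRstripSlash s ++ List.replicate m '/' := by
  refine ⟨(s.reverse.takeWhile (fun c => c == '/')).length, ?_⟩
  have h1 : s.reverse.takeWhile (fun c => c == '/') =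
      List.replicate (s.reverse.takeWhile (fun c => c == '/')).length '/' := by
    apply List.eq_replicate_of_mem
    intro c hc
    have := List.mem_takeWhile_imp hc
    simpa using this
  calc s = s.reverse.reverse := by simp
    _ = ((s.reverse.takeWhile (fun c => c == '/')) ++ (s.reverse.dropWhile (fun c => c == '/'))).reverse := by
        rw [List.takeWhile_append_dropWhile]
    _ = pvRstripSlash s ++ List.replicate (s.reverse.takeWhile (fun c => c == '/')).length '/' := by
        rw [List.reverse_append, pvRstripSlash]
        congr 1
        conv_lhs => rw [h1]
        rw [List.reverse_replicate]

theorem pvAGo_eq (parts : List (List Char)) :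
    ∀ n i, parts.length - i = n →
      pvAGo parts i =
        pvRender (pvLoopA (if i = 0 then none else some (parts.getD (i-1) [])) (parts.drop i)) := by
  intro n
  induction n with
  | zero =>
    intro i h
    have hge : parts.length ≤ i := by omega
    rw [pvAGo, dif_neg (by omega)]
    rw [List.drop_eq_nil_of_le hge]
    simp [pvLoopA, pvRender]
  | succ n ih =>
    intro i h
    have hlt : i < parts.length := by omega
    have hdrop : parts.drop i = parts[i] :: parts.drop (i+1) := List.drop_eq_getElem_cons hlt
    have hgetD : parts.getD i [] = parts[i] := List.getD_eq_getElem _ _ hlt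
    have htid : (PySem.Chars.splitOn (parts.getD (i+1) []) ['?']).headD [] =
        pvTid (parts.getD (i+1) []) := by
      rw [pvSplitOn_eq, pvHeadD_splitOnP]
    have hrestne : parts.drop (i+1) ≠ [] ↔ i + 1 < parts.length := by
      rw [ne_eq, List.drop_eq_nil_iff]; omega
    have hheadD : i + 1 < parts.length → (parts.drop (i+1)).headD [] = parts.getD (i+1) [] := by
      intro h2
      rw [List.drop_eq_getElem_cons h2, List.headD_cons, List.getD_eq_getElem _ _ h2]
    rw [pvAGo, dif_pos hlt, hdrop, pvLoopA_cons]
    by_cases hc : parts[i] = "status".toList ∧ i + 1 < parts.length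
    · rw [if_pos (by rw [hgetD]; exact hc)]
      simp only [htid]
      rw [hheadD hc.2]
      by_cases hd : PySem.Chars.strIsdigit (pvTid (parts.getD (i+1) []))
      · rw [if_pos hd]
        have hcond : parts[i] = "status".toList ∧ List.drop (i+1) parts ≠ [] ∧
            PySem.Chars.strIsdigit (pvTid (parts.getD (i+1) [])) = true :=
          ⟨hc.1, hrestne.mpr hc.2, hd⟩
        rcases Nat.eq_zero_or_pos i with h0 | hpos
        · subst h0
          rw [if_neg (lt_irrefl 0), if_pos hcond, if_pos rfl]
          rfl
        · rw [if_pos hpos, if_pos hcond, if_neg (by omega : ¬ i = 0)]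
          rfl
      · rw [if_neg hd, if_neg (by rintro ⟨-, -, hdd⟩; exact hd hdd)]
        rw [ih (i+1) (by omega)]
        have hi1 : ¬ ((i : Nat) + 1 = 0) := by omega
        rw [if_neg hi1, Nat.add_sub_cancel, hgetD]
    · rw [if_neg (by rw [hgetD]; exact hc)]
      rw [if_neg (by
        rintro ⟨h1, h2, -⟩
        exact hc ⟨h1, hrestne.mp h2⟩)]
      rw [ih (i+1) (by omega)]
      have hi1 : ¬ ((i : Nat) + 1 = 0) := by omega
      rw [if_neg hi1, Nat.add_sub_cancel, hgetD]

theorem pvMatchStatus_body (r tail : List Char) (hr : '/' ∉ r)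
    (ht : tail = [] ∨ ∃ t', tail = '/' :: t') :
    pvMatchStatus ("status/".toList ++ (r ++ tail)) =
      if PySem.Chars.strIsdigit (pvTid r) then some (pvTid r) else none := by
  have hsw : PySem.Chars.startswith ("status/".toList ++ (r ++ tail)) ("status/".toList) = true :=
    (PySem.Chars.startswith_iff _ _).mpr (List.prefix_append _ _)
  have hdrop7 : ("status/".toList ++ (r ++ tail)).drop 7 = r ++ tail :=
    List.drop_left' (by decide)
  rw [pvMatchStatus, if_pos hsw]
  simp only [hdrop7, pvTid]
  have hsplit : r.takeWhile (fun c => c != '?') ++ r.dropWhile (fun c => c != '?') = r :=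
    List.takeWhile_append_dropWhile
  set tw := r.takeWhile (fun c => c != '?') with htw_def
  set rem := r.dropWhile (fun c => c != '?') with hrem_def
  have hrem : rem = [] ∨ ∃ rr, rem = '?' :: rr := by
    by_cases h0 : rem = []
    · exact Or.inl h0
    · right
      have := List.head_dropWhile_not (fun c => c != '?') h0
      refine ⟨rem.tail, ?_⟩
      conv_lhs => rw [← List.cons_head_tail h0]
      simp only [List.cons.injEq, and_true]
      simpa using this
  have htail_tw : ∀ (x : List Char), (x = [] ∨ ∃ t', x = '/' :: t') ∨ (∃ rr, x = '?' :: rr) →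
      x.takeWhile PySem.Chars.isdigit = [] ∧ x.dropWhile PySem.Chars.isdigit = x := by
    rintro x (⟨rfl | ⟨t', rfl⟩⟩ | ⟨rr, rfl⟩)
    · simp
    · exact ⟨List.takeWhile_cons_of_neg (by decide), List.dropWhile_cons_of_neg (by decide)⟩
    · exact ⟨List.takeWhile_cons_of_neg (by decide), List.dropWhile_cons_of_neg (by decide)⟩
  by_cases hdg : PySem.Chars.strIsdigit tw
  · -- tw nonempty, all digits
    have htne : tw ≠ [] := by
      intro h0; rw [h0] at hdg; simp [PySem.Chars.strIsdigit] at hdg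
    have hall : ∀ c ∈ tw, PySem.Chars.isdigit c = true := by
      intro c hc
      have h2 : ¬tw = [] ∧ ∀ x ∈ tw, PySem.Chars.isdigit x = true := by
        simpa [PySem.Chars.strIsdigit, List.all_eq_true] using hdg
      exact h2.2 c hc
    have hremtail : (rem ++ tail) = [] ∨ (∃ t', (rem ++ tail) = '/' :: t') ∨ (∃ rr, (rem ++ tail) = '?' :: rr) := by
      rcases hrem with h0 | ⟨rr, hq⟩
      · rw [h0, List.nil_append]
        rcases ht with h | ⟨t', h⟩
        · exact Or.inl h
        · exact Or.inr (Or.inl ⟨t', h⟩)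
      · exact Or.inr (Or.inr ⟨rr ++ tail, by rw [hq]; rfl⟩)
    have hx := htail_tw (rem ++ tail) (by tauto)
    have harr : r ++ tail = tw ++ (rem ++ tail) := by rw [← hsplit]; simp
    rw [harr, List.takeWhile_append_of_pos hall, List.dropWhile_append_of_pos hall, hx.1, hx.2,
      List.append_nil]
    rw [if_neg htne, if_pos hdg]
    rcases hremtail with h0 | ⟨t', hq⟩ | ⟨rr, hq⟩
    · simp [h0]
    · simp [hq]
    · simp [hq]
  · rw [if_neg hdg]
    by_cases htnil : tw = []
    · have hrrem : r = rem := by rw [← hsplit, htnil, List.nil_append]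
      have hx : (r ++ tail).takeWhile PySem.Chars.isdigit = [] := by
        rcases hrem with h0 | ⟨rr, hq⟩
        · have : r = [] := by rw [hrrem, h0]
          subst this
          rcases ht with h | ⟨t', h⟩ <;> simp [h]
          · decide
        · rw [hrrem, hq, List.cons_append]
          exact List.takeWhile_cons_of_neg (by decide)
      rw [hx, if_pos rfl]
    · -- tw has a non-digit
      have hd_all : ∀ c ∈ tw.takeWhile PySem.Chars.isdigit, PySem.Chars.isdigit c = true :=
        fun c hc => List.mem_takeWhile_imp hc
      have hene : tw.dropWhile PySem.Chars.isdigit ≠ [] := by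
        intro h0
        have hall : ∀ c ∈ tw, PySem.Chars.isdigit c = true := List.dropWhile_eq_nil_iff.mp h0
        apply hdg
        simp only [PySem.Chars.strIsdigit, Bool.and_eq_true, List.all_eq_true]
        exact ⟨by simpa using htnil, fun c hc => hall c hc⟩
      obtain ⟨x, e', he⟩ := List.exists_cons_of_ne_nil hene
      have hx_nd : PySem.Chars.isdigit x = false := by
        have h1 := List.head_dropWhile_not PySem.Chars.isdigit hene
        have h2 : (tw.dropWhile PySem.Chars.isdigit).head hene = x := by
          simp only [he]; rfl
        rwa [h2] at h1
      have hx_mem_tw : x ∈ tw := List.Sublist.mem (by rw [he]; exact List.mem_cons_self)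
        (List.dropWhile_sublist _)
      have hx_ne_q : (x == '?') = false := by
        have := List.mem_takeWhile_imp (p := fun c => c != '?') (by rw [← htw_def]; exact hx_mem_tw)
        simpa using this
      have hx_ne_s : (x == '/') = false := by
        have hx_mem_r : x ∈ r := List.Sublist.mem hx_mem_tw (by rw [htw_def]; exact List.takeWhile_sublist _)
        simp only [beq_eq_false_iff_ne, ne_eq]
        intro h0; rw [h0] at hx_mem_r; exact hr hx_mem_r
      have harr : r ++ tail = tw.takeWhile PySem.Chars.isdigit ++ (x :: (e' ++ (rem ++ tail))) := by
        rw [← hsplit]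
        conv_lhs => rw [← List.takeWhile_append_dropWhile (p := PySem.Chars.isdigit) (l := tw)]
        rw [he]
        simp
      rw [harr, List.takeWhile_append_of_pos hd_all, List.dropWhile_append_of_pos hd_all,
        List.takeWhile_cons_of_neg (by simp [hx_nd]), List.dropWhile_cons_of_neg (by simp [hx_nd]),
        List.append_nil]
      by_cases hdnil : tw.takeWhile PySem.Chars.isdigit = []
      · rw [if_pos hdnil]
      · rw [if_neg hdnil]
        simp [hx_ne_q, hx_ne_s]

theorem pvInter_cons₂ (a b : List Char) (l : List (List Char)) :
    List.intercalate ['/'] (a :: b :: l) = a ++ '/' :: List.intercalate ['/'] (b :: l) := by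
  simp [List.intercalate, List.intersperse_cons₂]

theorem pvInter_single (a : List Char) : List.intercalate ['/'] [a] = a := by
  simp [List.intercalate]

theorem pvPrefix_slash (a : List Char) (w v : List Char) :
    ∀ (b : List Char), '/' ∉ b → (a ++ '/' :: w) <+: (b ++ '/' :: v) → '/' ∉ a → a = b := by
  induction a with
  | nil =>
    intro b hb h _
    cases b with
    | nil => rfl
    | cons y b' =>
      simp only [List.nil_append, List.cons_append, List.cons_prefix_cons] at h
      exact absurd (h.1 ▸ List.mem_cons_self) hb
  | cons x a' ih =>
    intro b hb h ha
    cases b with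
    | nil =>
      simp only [List.cons_append, List.nil_append, List.cons_prefix_cons] at h
      exact absurd (h.1 ▸ List.mem_cons_self) ha
    | cons y b' =>
      simp only [List.cons_append, List.cons_prefix_cons] at h
      have hb' : '/' ∉ b' := fun hm => hb (List.mem_cons_of_mem _ hm)
      have ha' : '/' ∉ a' := fun hm => ha (List.mem_cons_of_mem _ hm)
      rw [h.1, ih b' hb' h.2 ha']

theorem pvMatchStatus_inter (segs : List (List Char)) (h : ∀ s ∈ segs, '/' ∉ s) :
    pvMatchStatus (List.intercalate ['/'] segs) =
      match segs with
      | s0 :: s1 :: _ =>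
        if s0 = "status".toList ∧ PySem.Chars.strIsdigit (pvTid s1) then some (pvTid s1) else none
      | _ => none := by
  match segs, h with
  | [], h => simp [List.intercalate, pvMatchStatus]
  | [s], h =>
    rw [pvInter_single]
    have hns : PySem.Chars.startswith s ("status/".toList) = false := by
      by_contra hcon
      have hpf : "status/".toList <+: s := (PySem.Chars.startswith_iff _ _).mp
        (by revert hcon; cases PySem.Chars.startswith s ("status/".toList) <;> simp)
      have : '/' ∈ s := hpf.mem (by decide)
      exact h s List.mem_cons_self this
    rw [pvMatchStatus, if_neg (by simpa using hns)]
  | s0 :: s1 :: rest, h =>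
    rw [pvInter_cons₂]
    have hs0 : '/' ∉ s0 := h s0 List.mem_cons_self
    by_cases he : s0 = "status".toList
    · subst he
      cases rest with
      | nil =>
        rw [pvInter_single]
        rw [show "status".toList ++ '/' :: s1 = "status/".toList ++ (s1 ++ []) from by simp,
          pvMatchStatus_body s1 [] (h s1 (by simp)) (Or.inl rfl)]
        simp
      | cons r2 rest' =>
        rw [pvInter_cons₂,
          show "status".toList ++ '/' :: (s1 ++ '/' :: List.intercalate ['/'] (r2 :: rest')) =
            "status/".toList ++ (s1 ++ ('/' :: List.intercalate ['/'] (r2 :: rest'))) from rfl,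
          pvMatchStatus_body s1 _ (h s1 (by simp)) (Or.inr ⟨_, rfl⟩)]
        simp
    · have hns : PySem.Chars.startswith (s0 ++ '/' :: List.intercalate ['/'] (s1 :: rest))
          ("status/".toList) = false := by
        by_contra hcon
        have hpf : "status/".toList <+: s0 ++ '/' :: List.intercalate ['/'] (s1 :: rest) := by
          apply (PySem.Chars.startswith_iff _ _).mp
          revert hcon; cases PySem.Chars.startswith (s0 ++ '/' :: List.intercalate ['/'] (s1 :: rest)) ("status/".toList) <;> simp
        have : "status".toList = s0 :=
          pvPrefix_slash "status".toList [] _ s0 hs0 (by simpa using hpf) (by decide)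
        exact he this.symm
      rw [pvMatchStatus, if_neg (by simpa using hns)]
      have he' : ¬ (s0 = "status".toList ∧ PySem.Chars.strIsdigit (pvTid s1) = true) :=
        fun hc => he hc.1
      exact (if_neg he').symm

theorem pvGo_no_slash (s : List Char) (hs : '/' ∉ s) :
    ∀ l, pvGo (s ++ l) = pvGo l := by
  induction s with
  | nil => intro l; rfl
  | cons x s' ih =>
    intro l
    have hx : (x == '/') = false := by
      simp only [beq_eq_false_iff_ne, ne_eq]
      intro h0; rw [h0] at hs; exact hs List.mem_cons_self
    rw [List.cons_append, pvGo, if_neg (by simp [hx])]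
    exact ih (fun hm => hs (List.mem_cons_of_mem _ hm)) l

theorem pvMatchStatus_no_slash (s : List Char) (hs : '/' ∉ s) : pvMatchStatus s = none := by
  rw [pvMatchStatus, if_neg]
  intro hcon
  have hpf : "status/".toList <+: s := (PySem.Chars.startswith_iff _ _).mp hcon
  exact hs (hpf.mem (by decide))

theorem pvSearch_single (s : List Char) (hs : '/' ∉ s) : pvSearch s = none := by
  have h1 : pvGo s = none := by
    have := pvGo_no_slash s hs []
    simpa using this
  have h2 : s.dropWhile (fun c => c != '/') = [] := by
    apply List.dropWhile_eq_nil_iff.mpr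
    intro c hc
    simp only [bne_iff_ne, ne_eq]
    intro h0; rw [h0] at hc; exact hs hc
  rw [pvSearch, pvMatchCore, h2, pvMatchStatus_no_slash s hs, h1]
  rfl

theorem pvMatchCore_cons (s0 v : List Char) (hs : '/' ∉ s0) :
    pvMatchCore (s0 ++ '/' :: v) =
      match pvMatchStatus v with
      | some tid => some (some s0, tid)
      | none => (pvMatchStatus (s0 ++ '/' :: v)).map (fun tid => (none, tid)) := by
  have hall : ∀ c ∈ s0, (fun c => c != '/') c = true := by
    intro c hc
    simp only [bne_iff_ne, ne_eq]
    intro h0; rw [h0] at hc; exact hs hc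
  have hdw : (s0 ++ '/' :: v).dropWhile (fun c => c != '/') = '/' :: v := by
    rw [List.dropWhile_append_of_pos hall, List.dropWhile_cons_of_neg (by simp)]
  have htw : (s0 ++ '/' :: v).takeWhile (fun c => c != '/') = s0 := by
    rw [List.takeWhile_append_of_pos hall, List.takeWhile_cons_of_neg (by simp), List.append_nil]
  rw [pvMatchCore, hdw, htw]

theorem pvSearch_inter (segs : List (List Char)) (h : ∀ s ∈ segs, '/' ∉ s) :
    pvSearch (List.intercalate ['/'] segs) = pvLoopA none segs := by
  induction segs with
  | nil => simp [List.intercalate, pvSearch, pvMatchCore, pvMatchStatus, pvGo, pvLoopA]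
  | cons s0 tl ih =>
    cases tl with
    | nil =>
      rw [pvInter_single, pvSearch_single s0 (h s0 List.mem_cons_self), pvLoopA_cons,
        if_neg (by rintro ⟨-, hne, -⟩; exact hne rfl)]
      rfl
    | cons s1 rest =>
      have hs0 : '/' ∉ s0 := h s0 List.mem_cons_self
      have htl : ∀ s ∈ s1 :: rest, '/' ∉ s := fun s hm => h s (List.mem_cons_of_mem _ hm)
      rw [pvInter_cons₂]
      have hgo : pvGo (s0 ++ '/' :: List.intercalate ['/'] (s1 :: rest)) =
          pvSearch (List.intercalate ['/'] (s1 :: rest)) := by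
        rw [pvGo_no_slash s0 hs0, pvGo, if_pos (by simp)]
        rfl
      have hmsU' := pvMatchStatus_inter (s1 :: rest) htl
      have hmsU := pvMatchStatus_inter (s0 :: s1 :: rest) h
      rw [pvInter_cons₂] at hmsU
      simp only at hmsU
      rw [pvSearch, hgo, pvMatchCore_cons s0 _ hs0, ih htl]
      cases rest with
      | nil =>
        rw [pvInter_single] at hmsU' hmsU ⊢
        simp only at hmsU'
        rw [hmsU', hmsU]
        have hsingle : ∀ p, pvLoopA p [s1] = none := by
          intro p
          rw [pvLoopA_cons, if_neg (by rintro ⟨-, hne, -⟩; exact hne rfl)]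
          rfl
        rw [hsingle, pvLoopA_cons, hsingle]
        by_cases hN : s0 = "status".toList ∧ PySem.Chars.strIsdigit (pvTid s1) = true
        · rw [if_pos hN, if_pos ⟨hN.1, by simp, by rw [List.headD_cons]; exact hN.2⟩]
          rfl
        · rw [if_neg hN, if_neg (by rintro ⟨a, -, b⟩; rw [List.headD_cons] at b; exact hN ⟨a, b⟩)]
          rfl
      | cons r2 rest' =>
        simp only at hmsU'
        rw [hmsU', hmsU]
        by_cases hW : s1 = "status".toList ∧ PySem.Chars.strIsdigit (pvTid r2) = true
        · rw [if_pos hW]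
          have hNc : ¬ (s0 = "status".toList ∧ (s1 :: r2 :: rest') ≠ [] ∧
              PySem.Chars.strIsdigit (pvTid ((s1 :: r2 :: rest').headD [])) = true) := by
            rintro ⟨-, -, hd⟩
            rw [List.headD_cons, hW.1] at hd
            exact absurd hd (by decide)
          have hWc2 : s1 = "status".toList ∧ (r2 :: rest') ≠ [] ∧
              PySem.Chars.strIsdigit (pvTid ((r2 :: rest').headD [])) = true :=
            ⟨hW.1, by simp, by rw [List.headD_cons]; exact hW.2⟩
          rw [pvLoopA_cons (prev := none) (p := s0), if_neg hNc,
            pvLoopA_cons (prev := some s0) (p := s1), if_pos hWc2]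
          rfl
        · rw [if_neg hW]
          have hWc : ¬ (s1 = "status".toList ∧ r2 :: rest' ≠ [] ∧
              PySem.Chars.strIsdigit (pvTid ((r2 :: rest').headD [])) = true) := by
            rintro ⟨a, -, b⟩
            rw [List.headD_cons] at b
            exact hW ⟨a, b⟩
          by_cases hN : s0 = "status".toList ∧ PySem.Chars.strIsdigit (pvTid s1) = true
          · rw [if_pos hN]
            rw [pvLoopA_cons (prev := none) (p := s0),
              if_pos ⟨hN.1, by simp, by rw [List.headD_cons]; exact hN.2⟩]
            rfl
          · rw [if_neg hN]
            rw [pvLoopA_cons (prev := none) (p := s0),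
              if_neg (by rintro ⟨a, -, b⟩; rw [List.headD_cons] at b; exact hN ⟨a, b⟩),
              pvLoopA_cons (prev := none) (p := s1), if_neg hWc,
              pvLoopA_cons (prev := some s0) (p := s1), if_neg hWc]
            rfl

theorem pv_main (query : String) :
    extract_tweet_info_py query = extract_tweet_info_py_alt query := by
  simp only [extract_tweet_info_py, extract_tweet_info_py_alt]
  by_cases hdig : PySem.Str.strIsdigit (PySem.Str.strip query)
  · rw [if_pos hdig, if_pos hdig]
  · rw [if_neg hdig, if_neg hdig]
    set t := (PySem.Str.strip query).toList with ht
    have hA := pvAGo_eq (PySem.Chars.splitOn (pvRstripSlash t) ['/'])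
      (PySem.Chars.splitOn (pvRstripSlash t) ['/']).length 0 (by omega)
    rw [if_pos rfl, List.drop_zero] at hA
    rw [hA, pvSplitOn_eq]
    obtain ⟨m, hm⟩ := pvRstrip_decomp t
    have hstrip : pvLoopA none ((pvRstripSlash t).splitOnP (· == '/')) =
        pvLoopA none (t.splitOnP (· == '/')) := by
      conv_rhs => rw [hm]
      exact (pvLoopA_rstrip _ m).symm
    rw [hstrip]
    have hI : List.intercalate ['/'] (t.splitOnP (· == '/')) = t := by
      have := List.intercalate_splitOn t '/'
      rwa [show List.splitOn '/' t = List.splitOnP (· == '/') t from rfl] at this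
    have hE := pvSearch_inter (t.splitOnP (· == '/')) (pvSplitOnP_slash_free t)
    rw [hI] at hE
    rw [← hE]
    cases pvSearch t with
    | none => rfl
    | some p => cases p with | mk sn tid => rfl

-- ===== VERDICT (by name: the statement is the Claim_ definition above) =====
theorem extract_tweet_info_py_spec : Claim_equal_extract_tweet_info_py := by
  intro query _
  exact pv_main query
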